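-- pv_equiv track=rewrite | github.com/XS-create/cryoatom-cryosparc-tools | run_cryoatom.py | choose_map_field
-- ===== SOURCE A (Python) =====
-- def choose_map_field(row, explicit=None):
--     """从 dataset 的一行里自动选择 map 路径字段。"""
--     keys = list(row.keys())
--     if explicit:
--         if explicit in keys:
--             return explicit
--         raise RuntimeError(f"指定的 map 字段 '{explicit}' 不在 keys 里: {keys}")
--
--     preferred = [
--         "map_sharp/path",
--         "map/path",
--         "map_half_A/path",
--         "map_half_B/path",
--     ]
--     for k in preferred:
--         if k in keys:
--             return k
--
--     for k in keys:
--         if k.endswith("/path"):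
--             return k
--
--     raise RuntimeError(f"没找到可用的 map path 字段, keys: {keys}")
-- ===== SOURCE B (Python) =====
-- def choose_map_field(row, explicit=None):
--     keys = list(row.keys())
--     if explicit:
--         if explicit in keys:
--             return explicit
--         raise RuntimeError(f"指定的 map 字段 '{explicit}' 不在 keys 里: {keys}")
--
--     preferred = [
--         "map_sharp/path",
--         "map/path",
--         "map_half_A/path",
--         "map_half_B/path",
--     ]
--     # one pass: each key gets a priority (index in preferred, or len(preferred)
--     # for a generic '/path' key); keep the first key of minimal priority
--     best = None
--     for k in keys:
--         if k in preferred: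
--             p = preferred.index(k)
--         elif k.endswith("/path"):
--             p = len(preferred)
--         else:
--             continue
--         if best is None or p < best[0]:
--             best = (p, k)
--     if best is None:
--         raise RuntimeError(f"没找到可用的 map path 字段, keys: {keys}")
--     return best[1]
-- ===== Notes on version B (the rewrite author's own statement) =====
-- stated objective: alternative
-- what changed: Replaces A's two sequential scans (preferred list against keys, then keys for a '/path' suffix) by a single pass over the keys that assigns each candidate key a numeric priority and keeps the first key of minimal priority.
-- outside the precondition, e.g. on choose_map_field({'x': '1'}, None): A raises RuntimeError, B raises RuntimeError; on choose_map_field({'map/path': 'm'}, 'zz'): A raises RuntimeError, B raises RuntimeError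
import Mathlib
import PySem

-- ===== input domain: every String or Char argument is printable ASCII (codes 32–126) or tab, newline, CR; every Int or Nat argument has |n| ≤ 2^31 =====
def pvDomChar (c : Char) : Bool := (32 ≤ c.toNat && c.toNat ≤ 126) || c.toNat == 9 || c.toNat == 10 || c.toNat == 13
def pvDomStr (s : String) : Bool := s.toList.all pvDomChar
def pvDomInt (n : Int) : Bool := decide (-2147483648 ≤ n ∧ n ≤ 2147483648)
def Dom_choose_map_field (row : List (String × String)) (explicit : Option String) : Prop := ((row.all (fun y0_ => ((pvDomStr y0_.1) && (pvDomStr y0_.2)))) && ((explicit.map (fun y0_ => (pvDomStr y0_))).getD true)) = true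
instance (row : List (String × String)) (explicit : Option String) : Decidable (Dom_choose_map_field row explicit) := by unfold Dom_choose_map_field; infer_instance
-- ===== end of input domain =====

-- B replaces A's two sequential scans by a single pass that keeps the first key of
-- minimal numeric priority (objective: alternative decomposition, same cost).

-- ===== PORT A =====
-- the literal `preferred` list of A (and B)
def pvPreferred : List String :=
  ["map_sharp/path", "map/path", "map_half_A/path", "map_half_B/path"]

-- A's first loop: `for k in preferred: if k in keys: return k`
def pvFindPreferred : List String → List String → Option String
  | [], _ => none
  | k :: rest, keys => if k ∈ keys then some k else pvFindPreferred rest keys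

-- A's second loop: `for k in keys: if k.endswith("/path"): return k`
def pvFindPath : List String → Option String
  | [] => none
  | k :: rest => if PySem.Str.endswith k "/path" then some k else pvFindPath rest

-- the auto-selection part of A ("" where Python raises RuntimeError; excluded by Pre_)
def pvAutoA (keys : List String) : String :=
  match pvFindPreferred pvPreferred keys with
  | some k => k
  | none =>
    match pvFindPath keys with
    | some k => k
    | none => ""

def choose_map_field (row : List (String × String)) (explicit : Option String) : String :=
  -- keys = list(row.keys()) of the Python dict: first occurrences, in order
  let keys := PySem.Set.ofList (row.map Prod.fst)
  match explicit with
  | none => pvAutoA keys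
  | some e =>
    -- `if explicit:` — the empty string is falsy
    if e = "" then pvAutoA keys
    else if e ∈ keys then e else ""   -- "" where Python raises; excluded by Pre_

-- ===== PORT B =====
-- priority of a key: its index in preferred, else 4 for a generic '/path' key
def pvPrio (k : String) : Option Nat :=
  match PySem.List.index? pvPreferred k with
  | some i => some i
  | none => if PySem.Str.endswith k "/path" then some pvPreferred.length else none

-- B's loop body: keep the first key of strictly minimal priority
def pvStep (best : Option (Nat × String)) (k : String) : Option (Nat × String) :=
  match pvPrio k with
  | none => best
  | some p =>
    match best with
    | none => some (p, k)
    | some (bp, bk) => if p < bp then some (p, k) else some (bp, bk)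

-- the auto-selection part of B ("" where Python raises RuntimeError; excluded by Pre_)
def pvAutoB (keys : List String) : String :=
  match keys.foldl pvStep none with
  | some (_, k) => k
  | none => ""

def choose_map_field_alt (row : List (String × String)) (explicit : Option String) : String :=
  let keys := PySem.Set.ofList (row.map Prod.fst)
  match explicit with
  | none => pvAutoB keys
  | some e =>
    if e = "" then pvAutoB keys
    else if e ∈ keys then e else ""   -- "" where Python raises; excluded by Pre_

-- ===== PRECONDITION & SPEC =====
-- Pre_ excludes exactly the inputs on which A (and B) raise RuntimeError: a non-empty
-- explicit field absent from the keys, or no key ending in "/path" (every preferred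
-- key ends in "/path", so this single condition covers both loops of A).
def Pre_choose_map_field (row : List (String × String)) (explicit : Option String) : Prop :=
  if explicit.getD "" = "" then ∃ k ∈ row.map Prod.fst, PySem.Str.endswith k "/path" = true
  else explicit.getD "" ∈ row.map Prod.fst
instance (row : List (String × String)) (explicit : Option String) : Decidable (Pre_choose_map_field row explicit) := by unfold Pre_choose_map_field; infer_instance

def pvWitness_choose_map_field : (List (String × String)) × Option String :=
  ([("map/path", "m.mrc"), ("uid", "1")], none)

def Spec_choose_map_field (row : List (String × String)) (explicit : Option String) (out : String) : Prop := out = choose_map_field_alt row explicit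
instance (row : List (String × String)) (explicit : Option String) (out : String) : Decidable (Spec_choose_map_field row explicit out) := by unfold Spec_choose_map_field; infer_instance

-- ===== CLAIM (what is proved, stated in full; the proofs are below) =====
def Claim_equal_choose_map_field : Prop := ∀ (row : List (String × String)) (explicit : Option String), Dom_choose_map_field row explicit → Pre_choose_map_field row explicit → Spec_choose_map_field row explicit (choose_map_field row explicit)

-- ===== LEMMAS AND PROOFS =====

-- left-biased minimum on optional (priority, key) pairs
def pvMerge (a b : Option (Nat × String)) : Option (Nat × String) :=
  match a, b with
  | none, b => b
  | a, none => a
  | some (ap, ak), some (bp, bk) => if bp < ap then some (bp, bk) else some (ap, ak)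

theorem pvStep_eq_merge (b : Option (Nat × String)) (k : String) :
    pvStep b k = pvMerge b (pvStep none k) := by
  unfold pvStep pvMerge
  cases pvPrio k with
  | none => cases b <;> rfl
  | some p => cases b with
    | none => rfl
    | some q => rcases q with ⟨bp, bk⟩; simp

theorem pvMerge_assoc (a b c : Option (Nat × String)) :
    pvMerge (pvMerge a b) c = pvMerge a (pvMerge b c) := by
  rcases a with _ | ⟨ap, ak⟩ <;> rcases b with _ | ⟨bp, bk⟩ <;> rcases c with _ | ⟨cp, ck⟩ <;>
    try simp only [pvMerge]
  · split_ifs <;> rfl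
  by_cases h1 : bp < ap <;> by_cases h2 : cp < bp <;> by_cases h3 : cp < ap <;>
    simp [h1, h2, h3] <;> first | rfl | (exfalso; omega)

theorem foldl_pvStep_eq (keys : List String) :
    ∀ b : Option (Nat × String), keys.foldl pvStep b = pvMerge b (keys.foldl pvStep none) := by
  induction keys with
  | nil => intro b; cases b <;> rfl
  | cons k rest ih =>
    intro b
    simp only [List.foldl_cons]
    rw [ih (pvStep b k), ih (pvStep none k), pvStep_eq_merge b k, pvMerge_assoc]

theorem pvBest_cons (k : String) (rest : List String) :
    (k :: rest).foldl pvStep none = pvMerge (pvStep none k) (rest.foldl pvStep none) := by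
  simp only [List.foldl_cons]
  exact foldl_pvStep_eq rest (pvStep none k)

-- soundness: the fold's result is a key of the list with its priority
theorem pvBest_sound (keys : List String) :
    ∀ p k, keys.foldl pvStep none = some (p, k) → k ∈ keys ∧ pvPrio k = some p := by
  induction keys with
  | nil => intro p k h; simp [List.foldl] at h
  | cons x rest ih =>
    intro p k h
    rw [pvBest_cons] at h
    have hx : pvStep none x = none ∨ ∃ q, pvPrio x = some q ∧ pvStep none x = some (q, x) := by
      unfold pvStep
      cases hp : pvPrio x with
      | none => left; rfl
      | some q => right; exact ⟨q, rfl, rfl⟩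
    rcases hx with hx | ⟨q, hq, hx⟩
    · rw [hx] at h
      cases hr : rest.foldl pvStep none with
      | none => rw [hr] at h; simp [pvMerge] at h
      | some v =>
        rw [hr] at h
        rcases v with ⟨rp, rk⟩
        simp only [pvMerge] at h
        obtain ⟨h1, h2⟩ := Prod.mk.injEq .. ▸ (Option.some.injEq .. ▸ h)
        subst h1; subst h2
        obtain ⟨hm, hp⟩ := ih _ _ hr
        exact ⟨List.mem_cons_of_mem _ hm, hp⟩
    · rw [hx] at h
      cases hr : rest.foldl pvStep none with
      | none =>
        rw [hr] at h
        simp only [pvMerge] at h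
        obtain ⟨h1, h2⟩ := Prod.mk.injEq .. ▸ (Option.some.injEq .. ▸ h)
        subst h1; subst h2
        exact ⟨List.mem_cons_self, hq⟩
      | some v =>
        rw [hr] at h
        rcases v with ⟨rp, rk⟩
        simp only [pvMerge] at h
        split_ifs at h <;>
          obtain ⟨h1, h2⟩ := Prod.mk.injEq .. ▸ (Option.some.injEq .. ▸ h)
        · subst h1; subst h2
          obtain ⟨hm, hp⟩ := ih _ _ hr
          exact ⟨List.mem_cons_of_mem _ hm, hp⟩
        · subst h1; subst h2
          exact ⟨List.mem_cons_self, hq⟩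

-- closed form of the priority function on the four literal preferred keys
theorem pvPrio_eq (k : String) :
    pvPrio k =
      if k = "map_sharp/path" then some 0
      else if k = "map/path" then some 1
      else if k = "map_half_A/path" then some 2
      else if k = "map_half_B/path" then some 3
      else if PySem.Str.endswith k "/path" then some 4 else none := by
  unfold pvPrio pvPreferred
  by_cases h0 : k = "map_sharp/path"
  · subst h0; decide
  by_cases h1 : k = "map/path"
  · subst h1; decide
  by_cases h2 : k = "map_half_A/path"
  · subst h2; decide
  by_cases h3 : k = "map_half_B/path"
  · subst h3; decide
  have hn : PySem.List.index?
      ["map_sharp/path", "map/path", "map_half_A/path", "map_half_B/path"] k = none := by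
    rw [PySem.List.index?_eq_none_iff]
    simp [h0, h1, h2, h3]
  rw [hn]
  simp [h0, h1, h2, h3]

theorem pvPrio_inv (k : String) (p : Nat) (h : pvPrio k = some p) :
    (p = 0 ∧ k = "map_sharp/path") ∨ (p = 1 ∧ k = "map/path") ∨
    (p = 2 ∧ k = "map_half_A/path") ∨ (p = 3 ∧ k = "map_half_B/path") ∨
    (p = 4 ∧ PySem.Str.endswith k "/path" = true) := by
  rw [pvPrio_eq] at h
  split_ifs at h <;> simp_all

-- the fold finds the first preferred key present (case p = 0 … 3)
theorem pvBest_pref0 (keys : List String) (h : "map_sharp/path" ∈ keys) :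
    keys.foldl pvStep none = some (0, "map_sharp/path") := by
  induction keys with
  | nil => simp at h
  | cons x rest ih =>
    rw [pvBest_cons]
    by_cases hx : x = "map_sharp/path"
    · subst hx
      have : pvStep none "map_sharp/path" = some (0, "map_sharp/path") := by decide
      rw [this]
      cases hr : rest.foldl pvStep none with
      | none => rfl
      | some v => rcases v with ⟨rp, rk⟩; simp [pvMerge]
    · have hm : "map_sharp/path" ∈ rest := by
        rcases List.mem_cons.mp h with h' | h'
        · exact absurd h'.symm hx
        · exact h'
      rw [ih hm]
      cases hp : pvPrio x with
      | none => simp [pvStep, hp, pvMerge]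
      | some p =>
        have hpos : 0 < p := by
          rcases pvPrio_inv x p hp with ⟨_, hk⟩ | ⟨hpe, _⟩ | ⟨hpe, _⟩ | ⟨hpe, _⟩ | ⟨hpe, _⟩
          · exact absurd hk hx
          all_goals omega
        simp [pvStep, hp, pvMerge, hpos]

theorem pvBest_pref1 (keys : List String) (h0 : "map_sharp/path" ∉ keys)
    (h : "map/path" ∈ keys) :
    keys.foldl pvStep none = some (1, "map/path") := by
  induction keys with
  | nil => simp at h
  | cons x rest ih =>
    have h0r : "map_sharp/path" ∉ rest := fun hm => h0 (List.mem_cons_of_mem _ hm)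
    have h0x : x ≠ "map_sharp/path" := fun hx => h0 (hx ▸ List.mem_cons_self)
    rw [pvBest_cons]
    by_cases hx : x = "map/path"
    · subst hx
      have hs : pvStep none "map/path" = some (1, "map/path") := by decide
      rw [hs]
      cases hr : rest.foldl pvStep none with
      | none => rfl
      | some v =>
        rcases v with ⟨rp, rk⟩
        have hlt : ¬ rp < 1 := by
          intro hlt
          obtain ⟨hm, hp⟩ := pvBest_sound rest _ _ hr
          rcases pvPrio_inv rk rp hp with ⟨_, hk⟩ | ⟨hpe, _⟩ | ⟨hpe, _⟩ | ⟨hpe, _⟩ | ⟨hpe, _⟩ <;>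
            first
            | exact h0r (hk ▸ hm)
            | omega
        simp [pvMerge, hlt]
    · have hm : "map/path" ∈ rest := by
        rcases List.mem_cons.mp h with h' | h'
        · exact absurd h'.symm hx
        · exact h'
      rw [ih h0r hm]
      cases hp : pvPrio x with
      | none => simp [pvStep, hp, pvMerge]
      | some p =>
        have hgt : 1 < p := by
          rcases pvPrio_inv x p hp with ⟨_, hk⟩ | ⟨_, hk⟩ | ⟨hpe, _⟩ | ⟨hpe, _⟩ | ⟨hpe, _⟩
          · exact absurd hk h0x
          · exact absurd hk hx
          all_goals omega
        simp [pvStep, hp, pvMerge, hgt]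

theorem pvBest_pref2 (keys : List String) (h0 : "map_sharp/path" ∉ keys)
    (h1 : "map/path" ∉ keys) (h : "map_half_A/path" ∈ keys) :
    keys.foldl pvStep none = some (2, "map_half_A/path") := by
  induction keys with
  | nil => simp at h
  | cons x rest ih =>
    have h0r : "map_sharp/path" ∉ rest := fun hm => h0 (List.mem_cons_of_mem _ hm)
    have h1r : "map/path" ∉ rest := fun hm => h1 (List.mem_cons_of_mem _ hm)
    have h0x : x ≠ "map_sharp/path" := fun hx => h0 (hx ▸ List.mem_cons_self)
    have h1x : x ≠ "map/path" := fun hx => h1 (hx ▸ List.mem_cons_self)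
    rw [pvBest_cons]
    by_cases hx : x = "map_half_A/path"
    · subst hx
      have hs : pvStep none "map_half_A/path" = some (2, "map_half_A/path") := by decide
      rw [hs]
      cases hr : rest.foldl pvStep none with
      | none => rfl
      | some v =>
        rcases v with ⟨rp, rk⟩
        have hlt : ¬ rp < 2 := by
          intro hlt
          obtain ⟨hm, hp⟩ := pvBest_sound rest _ _ hr
          rcases pvPrio_inv rk rp hp with ⟨_, hk⟩ | ⟨_, hk⟩ | ⟨hpe, _⟩ | ⟨hpe, _⟩ | ⟨hpe, _⟩ <;>
            first
            | exact h0r (hk ▸ hm)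
            | exact h1r (hk ▸ hm)
            | omega
        simp [pvMerge, hlt]
    · have hm : "map_half_A/path" ∈ rest := by
        rcases List.mem_cons.mp h with h' | h'
        · exact absurd h'.symm hx
        · exact h'
      rw [ih h0r h1r hm]
      cases hp : pvPrio x with
      | none => simp [pvStep, hp, pvMerge]
      | some p =>
        have hgt : 2 < p := by
          rcases pvPrio_inv x p hp with ⟨_, hk⟩ | ⟨_, hk⟩ | ⟨_, hk⟩ | ⟨hpe, _⟩ | ⟨hpe, _⟩
          · exact absurd hk h0x
          · exact absurd hk h1x
          · exact absurd hk hx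
          all_goals omega
        simp [pvStep, hp, pvMerge, hgt]

theorem pvBest_pref3 (keys : List String) (h0 : "map_sharp/path" ∉ keys)
    (h1 : "map/path" ∉ keys) (h2 : "map_half_A/path" ∉ keys)
    (h : "map_half_B/path" ∈ keys) :
    keys.foldl pvStep none = some (3, "map_half_B/path") := by
  induction keys with
  | nil => simp at h
  | cons x rest ih =>
    have h0r : "map_sharp/path" ∉ rest := fun hm => h0 (List.mem_cons_of_mem _ hm)
    have h1r : "map/path" ∉ rest := fun hm => h1 (List.mem_cons_of_mem _ hm)
    have h2r : "map_half_A/path" ∉ rest := fun hm => h2 (List.mem_cons_of_mem _ hm)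
    have h0x : x ≠ "map_sharp/path" := fun hx => h0 (hx ▸ List.mem_cons_self)
    have h1x : x ≠ "map/path" := fun hx => h1 (hx ▸ List.mem_cons_self)
    have h2x : x ≠ "map_half_A/path" := fun hx => h2 (hx ▸ List.mem_cons_self)
    rw [pvBest_cons]
    by_cases hx : x = "map_half_B/path"
    · subst hx
      have hs : pvStep none "map_half_B/path" = some (3, "map_half_B/path") := by decide
      rw [hs]
      cases hr : rest.foldl pvStep none with
      | none => rfl
      | some v =>
        rcases v with ⟨rp, rk⟩
        have hlt : ¬ rp < 3 := by
          intro hlt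
          obtain ⟨hm, hp⟩ := pvBest_sound rest _ _ hr
          rcases pvPrio_inv rk rp hp with ⟨_, hk⟩ | ⟨_, hk⟩ | ⟨_, hk⟩ | ⟨hpe, _⟩ | ⟨hpe, _⟩ <;>
            first
            | exact h0r (hk ▸ hm)
            | exact h1r (hk ▸ hm)
            | exact h2r (hk ▸ hm)
            | omega
        simp [pvMerge, hlt]
    · have hm : "map_half_B/path" ∈ rest := by
        rcases List.mem_cons.mp h with h' | h'
        · exact absurd h'.symm hx
        · exact h'
      rw [ih h0r h1r h2r hm]
      cases hp : pvPrio x with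
      | none => simp [pvStep, hp, pvMerge]
      | some p =>
        have hgt : 3 < p := by
          rcases pvPrio_inv x p hp with ⟨_, hk⟩ | ⟨_, hk⟩ | ⟨_, hk⟩ | ⟨_, hk⟩ | ⟨hpe, _⟩
          · exact absurd hk h0x
          · exact absurd hk h1x
          · exact absurd hk h2x
          · exact absurd hk hx
          · omega
        simp [pvStep, hp, pvMerge, hgt]

-- with no preferred key present, the fold is exactly A's second scan
theorem pvBest_no_pref (keys : List String)
    (h0 : "map_sharp/path" ∉ keys) (h1 : "map/path" ∉ keys)
    (h2 : "map_half_A/path" ∉ keys) (h3 : "map_half_B/path" ∉ keys) :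
    keys.foldl pvStep none = (pvFindPath keys).map (fun k => (4, k)) := by
  induction keys with
  | nil => rfl
  | cons x rest ih =>
    have h0r : "map_sharp/path" ∉ rest := fun hm => h0 (List.mem_cons_of_mem _ hm)
    have h1r : "map/path" ∉ rest := fun hm => h1 (List.mem_cons_of_mem _ hm)
    have h2r : "map_half_A/path" ∉ rest := fun hm => h2 (List.mem_cons_of_mem _ hm)
    have h3r : "map_half_B/path" ∉ rest := fun hm => h3 (List.mem_cons_of_mem _ hm)
    have h0x : x ≠ "map_sharp/path" := fun hx => h0 (hx ▸ List.mem_cons_self)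
    have h1x : x ≠ "map/path" := fun hx => h1 (hx ▸ List.mem_cons_self)
    have h2x : x ≠ "map_half_A/path" := fun hx => h2 (hx ▸ List.mem_cons_self)
    have h3x : x ≠ "map_half_B/path" := fun hx => h3 (hx ▸ List.mem_cons_self)
    rw [pvBest_cons, ih h0r h1r h2r h3r]
    by_cases he : PySem.Str.endswith x "/path" = true
    · have hec : PySem.Chars.endswith x.toList ['/', 'p', 'a', 't', 'h'] = true := he
      have hpx : pvPrio x = some 4 := by
        rw [pvPrio_eq]; simp [h0x, h1x, h2x, h3x, hec]
      have hs : pvStep none x = some (4, x) := by unfold pvStep; rw [hpx]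
      rw [hs]
      have hfp : pvFindPath (x :: rest) = some x := by simp [pvFindPath, hec]
      rw [hfp]
      cases hr : pvFindPath rest with
      | none => rfl
      | some k => simp [pvMerge]
    · have hec : PySem.Chars.endswith x.toList ['/', 'p', 'a', 't', 'h'] = false := by
        cases hb : PySem.Chars.endswith x.toList ['/', 'p', 'a', 't', 'h'] with
        | false => rfl
        | true => exact absurd hb he
      have hpx : pvPrio x = none := by
        rw [pvPrio_eq]; simp [h0x, h1x, h2x, h3x, hec]
      have hs : pvStep none x = none := by unfold pvStep; rw [hpx]
      rw [hs]
      have hfp : pvFindPath (x :: rest) = pvFindPath rest := by simp [pvFindPath, hec]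
      rw [hfp]
      cases pvFindPath rest <;> rfl

-- the two auto-selection functions agree on every key list
theorem pvAuto_eq (keys : List String) : pvAutoA keys = pvAutoB keys := by
  unfold pvAutoA pvAutoB
  by_cases h0 : "map_sharp/path" ∈ keys
  · rw [pvBest_pref0 keys h0]
    simp [pvFindPreferred, pvPreferred, h0]
  by_cases h1 : "map/path" ∈ keys
  · rw [pvBest_pref1 keys h0 h1]
    simp [pvFindPreferred, pvPreferred, h0, h1]
  by_cases h2 : "map_half_A/path" ∈ keys
  · rw [pvBest_pref2 keys h0 h1 h2]
    simp [pvFindPreferred, pvPreferred, h0, h1, h2]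
  by_cases h3 : "map_half_B/path" ∈ keys
  · rw [pvBest_pref3 keys h0 h1 h2 h3]
    simp [pvFindPreferred, pvPreferred, h0, h1, h2, h3]
  · rw [pvBest_no_pref keys h0 h1 h2 h3]
    have hfp : pvFindPreferred pvPreferred keys = none := by
      simp [pvFindPreferred, pvPreferred, h0, h1, h2, h3]
    rw [hfp]
    cases pvFindPath keys <;> rfl

-- ===== VERDICT (by name: the statement is the Claim_ definition above) =====
theorem choose_map_field_spec : Claim_equal_choose_map_field := by
  intro row explicit _ _
  show choose_map_field row explicit = choose_map_field_alt row explicit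
  unfold choose_map_field choose_map_field_alt
  cases explicit with
  | none => exact pvAuto_eq _
  | some e =>
    by_cases he : e = ""
    · simp only [he, reduceIte]
      exact pvAuto_eq _
    · simp only [if_neg he]
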